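-- pv_equiv track=rewrite | github.com/Wolf-gangSE/scratch-data | utilities/projects.py | frequency_block_types_used
-- ===== SOURCE A (Python) =====
-- def frequency_block_types_used(frequency: dict):
--     block = {}
--     for term in frequency:
--         prefix = term.split('_')[0]
--         if prefix not in block:
--             block[prefix] = 0
--         block[prefix] += 1
--     return block
-- ===== SOURCE B (Python) =====
-- def frequency_block_types_used(frequency: dict):
--     # Sort the prefixes, run-length encode the sorted list to get each
--     # prefix's count, then emit prefixes in first-occurrence order.
--     prefixes = [term.split('_')[0] for term in frequency]
--     runs = []
--     for p in sorted(prefixes):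
--         if runs and runs[-1][0] == p:
--             runs[-1] = (p, runs[-1][1] + 1)
--         else:
--             runs.append((p, 1))
--     counts = dict(runs)
--     seen = set()
--     block = {}
--     for p in prefixes:
--         if p not in seen:
--             seen.add(p)
--             block[p] = counts[p]
--     return block
-- ===== Notes on version B (the rewrite author's own statement) =====
-- stated objective: alternative
-- what changed: Replaces A's single hash-counter pass (conditional init + increment per key) by a sort-then-group pipeline: sort the prefixes, run-length encode the sorted list to obtain each prefix's count, then a separate pass emits prefixes in first-occurrence order with their precomputed counts.
import Mathlib
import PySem

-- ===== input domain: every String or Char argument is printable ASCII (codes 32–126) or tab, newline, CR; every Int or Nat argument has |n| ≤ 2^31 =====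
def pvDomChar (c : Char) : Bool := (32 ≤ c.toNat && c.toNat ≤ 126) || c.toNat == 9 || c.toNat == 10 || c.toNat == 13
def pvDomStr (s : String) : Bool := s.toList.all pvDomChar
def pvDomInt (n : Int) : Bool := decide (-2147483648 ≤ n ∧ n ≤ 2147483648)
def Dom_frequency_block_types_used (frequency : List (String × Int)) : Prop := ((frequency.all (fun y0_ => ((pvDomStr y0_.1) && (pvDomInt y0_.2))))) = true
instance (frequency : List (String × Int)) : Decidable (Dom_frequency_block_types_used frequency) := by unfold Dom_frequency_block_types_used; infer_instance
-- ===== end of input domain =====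

-- B replaces A's counter-dict pass by sort + run-length encoding + a first-occurrence
-- ordering pass; objective: alternative (different algorithm, similar cost).

-- term.split('_')[0]  (split('_') is never empty, so index 0 never raises; shared by both Pythons verbatim)
def pvPrefix (term : String) : String :=
  PySem.List.pyGetD ((PySem.Str.split? term "_").getD []) 0 ""

-- ===== PORT A =====
def frequency_block_types_used (frequency : List (String × Int)) : List (String × Int) :=
  (frequency.foldl
    (fun (block : PySem.Dict String Int) term =>
      let pfx := pvPrefix term.1
      let block := if block.contains pfx then block else block.insert pfx 0
      block.insert pfx (block.getD pfx 0 + 1))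
    PySem.Dict.empty).items

-- ===== PORT B =====
-- one iteration of Source B's run-length loop: 'if runs and runs[-1][0] == p: bump last else append (p, 1)'
def pvRunStep (runs : List (String × Int)) (p : String) : List (String × Int) :=
  match runs.getLast? with
  | some (q, c) => if q == p then runs.dropLast ++ [(p, c + 1)] else runs ++ [(p, 1)]
  | none => runs ++ [(p, 1)]

def frequency_block_types_used_alt (frequency : List (String × Int)) : List (String × Int) :=
  let prefixes := frequency.map (fun term => pvPrefix term.1)
  let runs := (PySem.List.sorted prefixes (fun x => x) false).foldl pvRunStep []
  let counts := PySem.Dict.ofList runs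
  -- 'counts[p]' in Source B never raises (p is drawn from prefixes, so it is a key of counts); getD 0 is exact there
  (prefixes.foldl
    (fun (st : PySem.Set String × PySem.Dict String Int) p =>
      if PySem.Set.contains st.1 p then st
      else (PySem.Set.add st.1 p, st.2.insert p (counts.getD p 0)))
    (PySem.Set.empty, PySem.Dict.empty)).2.items

-- ===== PRECONDITION & SPEC =====
def Spec_frequency_block_types_used (frequency : List (String × Int)) (out : List (String × Int)) : Prop := out = frequency_block_types_used_alt frequency
instance (frequency : List (String × Int)) (out : List (String × Int)) : Decidable (Spec_frequency_block_types_used frequency out) := by unfold Spec_frequency_block_types_used; infer_instance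

-- ===== CLAIM (what is proved, stated in full; the proofs are below) =====
def Claim_equal_frequency_block_types_used : Prop := ∀ (frequency : List (String × Int)), Dom_frequency_block_types_used frequency → Spec_frequency_block_types_used frequency (frequency_block_types_used frequency)

-- ===== LEMMAS AND PROOFS =====

-- A's loop body ("initialise to 0 if absent, then add 1") is pointwise the plain counter step.
theorem pvStep_eq (block : PySem.Dict String Int) (p : String) :
    ((if block.contains p then block else block.insert p 0).insert p
      ((if block.contains p then block else block.insert p 0).getD p 0 + 1))
      = block.insert p (block.getD p 0 + 1) := by
  by_cases h : block.contains p = true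
  · rw [if_pos h]
  · rw [if_neg h, PySem.Dict.getD_insert_self, PySem.Dict.insert_insert_self,
      PySem.Dict.getD_of_not_contains block 0 (by simpa using h)]

-- dedup is a sublist of its argument
theorem pvDedup_sublist (l : List String) : (PySem.List.dedup l).Sublist l := by
  induction l with
  | nil => simp [PySem.List.dedup]
  | cons x xs ih =>
    simp only [PySem.List.dedup_eq_ofList] at *
    rw [PySem.Set.ofList_cons]
    exact List.Sublist.cons₂ x ((List.filter_sublist).trans ih)

-- in a ≤-sorted list every element is at most the last one
theorem pvLe_getLast (l : List String) (hpw : l.Pairwise (· ≤ ·)) (h : l ≠ [])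
    (y : String) (hy : y ∈ l) : y ≤ l.getLast h := by
  rcases List.mem_append.1 ((List.dropLast_append_getLast h) ▸ hy) with hd | hl
  · have hp := hpw
    rw [← List.dropLast_append_getLast h] at hp
    exact (List.pairwise_append.mp hp).2.2 y hd _ (by simp)
  · simp only [List.mem_singleton] at hl
    exact hl.le

-- run-length encoding of a ≤-sorted list s yields its distinct elements with their counts
theorem pvRuns_sorted (s : List String) (hpw : s.Pairwise (· ≤ ·)) :
    s.foldl pvRunStep [] = (PySem.List.dedup s).map (fun k => (k, (s.count k : Int))) := by
  induction s using List.reverseRecOn with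
  | nil => simp [PySem.List.dedup]
  | append_singleton s x ih =>
    have hpws : s.Pairwise (· ≤ ·) := hpw.sublist (List.sublist_append_left s [x])
    have hle : ∀ y ∈ s, y ≤ x := fun y hy =>
      (List.pairwise_append.mp hpw).2.2 y hy x (by simp)
    rw [List.foldl_append, List.foldl_cons, List.foldl_nil, ih hpws]
    rcases eq_or_ne s [] with rfl | hs
    · simp [pvRunStep, PySem.List.dedup_eq_ofList, PySem.Set.ofList_cons, PySem.Set.discard]
    · have hD : PySem.List.dedup s ≠ [] := by
        cases s with
        | nil => exact absurd rfl hs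
        | cons a t => simp [PySem.List.dedup_eq_ofList, PySem.Set.ofList_cons]
      have hDpw : (PySem.List.dedup s).Pairwise (· ≤ ·) := hpws.sublist (pvDedup_sublist s)
      have hnd : (PySem.List.dedup s).Nodup := PySem.List.nodup_dedup s
      set d := (PySem.List.dedup s).getLast hD with hd
      have hdmem : d ∈ s := (PySem.List.mem_dedup _ _).1 (List.getLast_mem hD)
      have hlast : ((PySem.List.dedup s).map (fun k => (k, (s.count k : Int)))).getLast?
          = some (d, (s.count d : Int)) := by
        rw [List.getLast?_map, List.getLast?_eq_some_getLast hD]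
        rfl
      have hstep : pvRunStep ((PySem.List.dedup s).map (fun k => (k, (s.count k : Int)))) x
          = if (d == x) = true
            then ((PySem.List.dedup s).map (fun k => (k, (s.count k : Int)))).dropLast
                  ++ [(x, (s.count d : Int) + 1)]
            else (PySem.List.dedup s).map (fun k => (k, (s.count k : Int))) ++ [(x, 1)] := by
        unfold pvRunStep
        rw [hlast]
      rw [hstep]
      by_cases hdx : d = x
      · -- the new element extends the last run
        subst hdx
        rw [if_pos (by simp)]
        have hdd : PySem.List.dedup (s ++ [d]) = PySem.List.dedup s := by
          simp only [PySem.List.dedup_eq_ofList, PySem.Set.ofList_append_singleton]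
          simp [PySem.Set.add, hdmem]
        rw [hdd]
        have hdnot : d ∉ (PySem.List.dedup s).dropLast := by
          have h2 := hnd
          rw [← List.dropLast_append_getLast hD] at h2
          intro hm
          exact (List.disjoint_of_nodup_append h2) hm (by simp [hd])
        conv_rhs => rw [← List.dropLast_append_getLast hD]
        rw [List.map_append, ← List.map_dropLast]
        refine congrArg₂ (· ++ ·) (List.map_congr_left ?_) ?_
        · intro k hk
          have hkne : k ≠ d := fun h => hdnot (h ▸ hk)
          simp [List.count_append, List.count_eq_zero, hkne]
        · rw [← hd]
          simp [List.count_append]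
      · -- the new element starts a fresh run
        rw [if_neg (by simpa using hdx)]
        have hx : x ∉ s := by
          intro hxs
          have h1 : x ≤ d := pvLe_getLast _ hDpw hD x ((PySem.List.mem_dedup _ _).2 hxs)
          have h2 : d ≤ x := hle d hdmem
          exact hdx (le_antisymm h2 h1)
        have hdd : PySem.List.dedup (s ++ [x]) = PySem.List.dedup s ++ [x] := by
          simp only [PySem.List.dedup_eq_ofList, PySem.Set.ofList_append_singleton]
          simp [PySem.Set.add, hx]
        rw [hdd, List.map_append]
        refine congrArg₂ (· ++ ·) (List.map_congr_left ?_) ?_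
        · intro k hk
          have hkne : k ≠ x := fun h => hx (h ▸ (PySem.List.mem_dedup _ _).1 hk)
          simp [List.count_append, List.count_eq_zero, hkne]
        · simp [List.count_append, List.count_eq_zero_of_not_mem hx]

-- looking a distinct element up in dict(runs) returns its count
theorem pvCounts_getD (s : List String) (k : String) (hk : k ∈ s) :
    (PySem.Dict.ofList ((PySem.List.dedup s).map (fun q => (q, (s.count q : Int))))).getD k 0
      = (s.count k : Int) := by
  have hfold : PySem.Dict.ofList ((PySem.List.dedup s).map (fun q => (q, (s.count q : Int))))
      = ((PySem.List.dedup s).map (fun q => (q, (s.count q : Int)))).foldl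
          (fun d p => d.insert p.1 p.2) PySem.Dict.empty := rfl
  have hfresh : (((PySem.List.dedup s).map (fun q => (q, (s.count q : Int)))).foldl
        (fun d p => d.insert p.1 p.2) PySem.Dict.empty).items
      = PySem.Dict.empty.items
        ++ ((PySem.List.dedup s).map (fun q => (q, (s.count q : Int)))).map (fun a => (a.1, a.2)) :=
    PySem.Dict.items_foldl_insert_fresh _ _ _ _
      (fun a _ => PySem.Dict.contains_empty _)
      (by simp [List.map_map, Function.comp_def])
  have hitems : (PySem.Dict.ofList ((PySem.List.dedup s).map (fun q => (q, (s.count q : Int))))).items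
      = (PySem.List.dedup s).map (fun q => (q, (s.count q : Int))) := by
    rw [hfold, hfresh]
    have he : PySem.Dict.empty.items = ([] : List (String × Int)) := rfl
    simp [he, Function.comp_def]
  have hkeys : (PySem.Dict.ofList ((PySem.List.dedup s).map (fun q => (q, (s.count q : Int))))).keys.Nodup := by
    have hk' : (PySem.Dict.ofList ((PySem.List.dedup s).map (fun q => (q, (s.count q : Int))))).keys
        = (PySem.Dict.ofList ((PySem.List.dedup s).map (fun q => (q, (s.count q : Int))))).items.map Prod.fst := rfl
    rw [hk', hitems]
    simp [List.map_map, Function.comp_def]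
  have hmem : (k, (s.count k : Int))
      ∈ (PySem.Dict.ofList ((PySem.List.dedup s).map (fun q => (q, (s.count q : Int))))).items := by
    rw [hitems]
    exact List.mem_map.2 ⟨k, (PySem.List.mem_dedup _ _).2 hk, rfl⟩
  exact PySem.Dict.getD_of_mem_items _ hmem hkeys 0

-- the emit loop over xs produces one item per first occurrence, valued by f
theorem pvEmit (f : String → Int) (xs : List String) :
    (xs.foldl
      (fun (st : PySem.Set String × PySem.Dict String Int) p =>
        if PySem.Set.contains st.1 p then st
        else (PySem.Set.add st.1 p, st.2.insert p (f p)))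
      (PySem.Set.empty, PySem.Dict.empty)).1 = PySem.Set.ofList xs
    ∧ (xs.foldl
      (fun (st : PySem.Set String × PySem.Dict String Int) p =>
        if PySem.Set.contains st.1 p then st
        else (PySem.Set.add st.1 p, st.2.insert p (f p)))
      (PySem.Set.empty, PySem.Dict.empty)).2.items
        = (PySem.Set.ofList xs).map (fun k => (k, f k)) := by
  induction xs using List.reverseRecOn with
  | nil => exact ⟨rfl, rfl⟩
  | append_singleton xs x ih =>
    obtain ⟨ih1, ih2⟩ := ih
    rw [List.foldl_append, List.foldl_cons, List.foldl_nil, PySem.Set.ofList_append_singleton]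
    by_cases hx : x ∈ xs
    · have hc : PySem.Set.contains
          ((xs.foldl (fun (st : PySem.Set String × PySem.Dict String Int) p =>
            if PySem.Set.contains st.1 p then st
            else (PySem.Set.add st.1 p, st.2.insert p (f p)))
            (PySem.Set.empty, PySem.Dict.empty)).1) x = true := by
        rw [ih1]; exact (PySem.Set.contains_iff _ _).2 ((PySem.Set.mem_ofList _ _).2 hx)
      rw [if_pos hc]
      have hadd : PySem.Set.add (PySem.Set.ofList xs) x = PySem.Set.ofList xs := by
        simp [PySem.Set.add, hx]
      rw [hadd]
      exact ⟨ih1, ih2⟩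
    · have hcn : ¬ (PySem.Set.contains
          ((xs.foldl (fun (st : PySem.Set String × PySem.Dict String Int) p =>
            if PySem.Set.contains st.1 p then st
            else (PySem.Set.add st.1 p, st.2.insert p (f p)))
            (PySem.Set.empty, PySem.Dict.empty)).1) x = true) := by
        rw [ih1]
        intro h
        exact hx ((PySem.Set.mem_ofList _ _).1 ((PySem.Set.contains_iff _ _).1 h))
      rw [if_neg hcn]
      have hadd : PySem.Set.add (PySem.Set.ofList xs) x = PySem.Set.ofList xs ++ [x] := by
        simp [PySem.Set.add, hx]
      constructor
      · rw [ih1]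
      · have hnotc : ((xs.foldl (fun (st : PySem.Set String × PySem.Dict String Int) p =>
              if PySem.Set.contains st.1 p then st
              else (PySem.Set.add st.1 p, st.2.insert p (f p)))
              (PySem.Set.empty, PySem.Dict.empty)).2).contains x = false := by
          rw [PySem.Dict.contains_eq_decide_mem_keys]
          simp only [PySem.Dict.keys, ih2, List.map_map, Function.comp_def]
          simp [PySem.Set.mem_ofList, hx]
        rw [PySem.Dict.items_insert_of_not_contains _ _ hnotc, ih2, hadd, List.map_append]
        simp

-- ===== VERDICT (by name: the statement is the Claim_ definition above) =====
theorem frequency_block_types_used_spec : Claim_equal_frequency_block_types_used := by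
  intro frequency _
  show _ = _
  have hA : frequency_block_types_used frequency
      = (PySem.Set.ofList (frequency.map (fun term => pvPrefix term.1))).map
          (fun k => (k, ((frequency.map (fun term => pvPrefix term.1)).count k : Int))) := by
    unfold frequency_block_types_used
    have h1 : frequency.foldl
        (fun (block : PySem.Dict String Int) term =>
          let pfx := pvPrefix term.1
          let block := if block.contains pfx then block else block.insert pfx 0
          block.insert pfx (block.getD pfx 0 + 1))
        PySem.Dict.empty
        = (frequency.map (fun term => pvPrefix term.1)).foldl
            (fun (block : PySem.Dict String Int) p => block.insert p (block.getD p 0 + 1))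
            PySem.Dict.empty := by
      rw [List.foldl_map]
      exact PySem.List.foldl_congr_mem _ _ _ _ (fun d t _ => pvStep_eq d (pvPrefix t.1))
    rw [h1, PySem.Dict.foldl_insert_getD_add_one_eq_counter, PySem.Dict.items_counter]
  have hB : frequency_block_types_used_alt frequency
      = (PySem.Set.ofList (frequency.map (fun term => pvPrefix term.1))).map
          (fun k => (k, ((frequency.map (fun term => pvPrefix term.1)).count k : Int))) := by
    unfold frequency_block_types_used_alt
    simp only []
    rw [(pvEmit _ _).2]
    apply List.map_congr_left
    intro k hk
    have hkp : k ∈ frequency.map (fun term => pvPrefix term.1) := (PySem.Set.mem_ofList _ _).1 hk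
    have hks : k ∈ PySem.List.sorted (frequency.map (fun term => pvPrefix term.1)) (fun x => x) false :=
      (PySem.List.mem_sorted _ _ _ _).2 hkp
    have hpw : (PySem.List.sorted (frequency.map (fun term => pvPrefix term.1)) (fun x => x) false).Pairwise (· ≤ ·) := by
      simpa using PySem.List.sorted_pairwise (frequency.map (fun term => pvPrefix term.1)) (fun x => x)
    rw [pvRuns_sorted _ hpw, pvCounts_getD _ k hks,
      (PySem.List.sorted_perm (frequency.map (fun term => pvPrefix term.1)) (fun x => x) false).count_eq k]
  rw [hA, hB]
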